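-- pv_equiv track=rewrite | github.com/ritikbhambu/College-query-bot | chatbot/query_engine.py | extract_query_info
-- ===== SOURCE A (Python) =====
-- def tokenize(message):
--     return message.lower().replace('?', '').replace('.', '').split()
--
-- def extract_query_info(message):
--     tokens = tokenize(message)
--
--     # Possessive check
--     if any(word in tokens for word in ["friend", "friends", "his", "her", "their", "someone"]):
--         return "unsupported", None
--
--     # Intent detection
--     if "attendance" in tokens:
--         intent = "attendance"
--     elif "marks" in tokens or "score" in tokens:
--         intent = "marks"
--     elif "faculty" in tokens or "teacher" in tokens:
--         intent = "faculty"
--     else: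
--         intent = None
--
--     # Subject detection
--     subjects = ["dbms", "math", "os", "cse", "ds", "ai", "ml"]
--     subject = None
--     for token in tokens:
--         if token in subjects:
--             subject = token.upper()
--             break
--
--     return intent, subject
-- ===== SOURCE B (Python) =====
-- POSSESSIVE = {"friend", "friends", "his", "her", "their", "someone"}
-- SUBJECTS = {"dbms", "math", "os", "cse", "ds", "ai", "ml"}
--
-- def extract_query_info(message):
--     # One gather-then-decide pass over the tokens instead of five repeated scans.
--     tokens = message.lower().replace('?', '').replace('.', '').split()
--     possessive = attendance = marks = faculty = False
--     subject = None
--     for t in tokens: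
--         if t in POSSESSIVE:
--             possessive = True
--         elif t == "attendance":
--             attendance = True
--         elif t in ("marks", "score"):
--             marks = True
--         elif t in ("faculty", "teacher"):
--             faculty = True
--         elif subject is None and t in SUBJECTS:
--             subject = t.upper()
--     if possessive:
--         return "unsupported", None
--     if attendance:
--         intent = "attendance"
--     elif marks:
--         intent = "marks"
--     elif faculty:
--         intent = "faculty"
--     else:
--         intent = None
--     return intent, subject
-- ===== Notes on version B (the rewrite author's own statement) =====
-- stated objective: alternative
-- what changed: Replaces A's six possessive membership tests plus five intent scans and a separate subject loop over the token list with a single gather pass that records keyword-group flags and the first subject token, then decides intent by the same priority.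
import Mathlib
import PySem

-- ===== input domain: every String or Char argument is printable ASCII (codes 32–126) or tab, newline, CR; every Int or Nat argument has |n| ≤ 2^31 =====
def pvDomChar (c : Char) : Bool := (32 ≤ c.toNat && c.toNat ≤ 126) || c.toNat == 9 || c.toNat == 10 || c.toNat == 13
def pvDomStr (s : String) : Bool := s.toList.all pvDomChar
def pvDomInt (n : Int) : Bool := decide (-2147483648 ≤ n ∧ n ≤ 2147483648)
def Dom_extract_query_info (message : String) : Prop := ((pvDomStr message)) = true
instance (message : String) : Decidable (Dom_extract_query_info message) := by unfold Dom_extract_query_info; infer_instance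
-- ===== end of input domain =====

-- B replaces A's repeated membership scans with one gather-then-decide pass; objective: alternative.

-- ===== PORT A =====
def pyTokenize (message : String) : List String :=
  PySem.Str.split₀ (PySem.Str.replace (PySem.Str.replace (PySem.Str.lower message) "?" "") "." "")

-- A's subject loop: first token in the subject list, uppercased, with break
def aSubjLoop : List String → Option String
  | [] => none
  | t :: ts =>
    if (["dbms", "math", "os", "cse", "ds", "ai", "ml"] : List String).contains t then
      some (PySem.Str.upper t)
    else aSubjLoop ts

def extract_query_info (message : String) : Option String × Option String :=
  let tokens := pyTokenize message
  if (["friend", "friends", "his", "her", "their", "someone"] : List String).any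
      (fun w => tokens.contains w) then
    (some "unsupported", none)
  else
    let intent : Option String :=
      if tokens.contains "attendance" then some "attendance"
      else if tokens.contains "marks" || tokens.contains "score" then some "marks"
      else if tokens.contains "faculty" || tokens.contains "teacher" then some "faculty"
      else none
    (intent, aSubjLoop tokens)

-- ===== PORT B =====
-- one-pass state: (possessive, attendance, marks, faculty, first subject seen)
def altStep (st : Bool × Bool × Bool × Bool × Option String) (t : String) :
    Bool × Bool × Bool × Bool × Option String :=
  match st with
  | (p, a, m, f, s) =>
    if (["friend", "friends", "his", "her", "their", "someone"] : List String).contains t then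
      (true, a, m, f, s)
    else if t == "attendance" then (p, true, m, f, s)
    else if t == "marks" || t == "score" then (p, a, true, f, s)
    else if t == "faculty" || t == "teacher" then (p, a, m, true, s)
    else if s == none && (["dbms", "math", "os", "cse", "ds", "ai", "ml"] : List String).contains t then
      (p, a, m, f, some (PySem.Str.upper t))
    else (p, a, m, f, s)

def extract_query_info_alt (message : String) : Option String × Option String :=
  let tokens := PySem.Str.split₀ (PySem.Str.replace (PySem.Str.replace (PySem.Str.lower message) "?" "") "." "")
  let st := tokens.foldl altStep (false, false, false, false, none)
  if st.1 then (some "unsupported", none)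
  else
    (if st.2.1 then some "attendance"
     else if st.2.2.1 then some "marks"
     else if st.2.2.2.1 then some "faculty"
     else none, st.2.2.2.2)

-- ===== PRECONDITION & SPEC =====
def Spec_extract_query_info (message : String) (out : Option String × Option String) : Prop := out = extract_query_info_alt message
instance (message : String) (out : Option String × Option String) : Decidable (Spec_extract_query_info message out) := by unfold Spec_extract_query_info; infer_instance

-- ===== CLAIM (what is proved, stated in full; the proofs are below) =====
def Claim_equal_extract_query_info : Prop := ∀ (message : String), Dom_extract_query_info message → Spec_extract_query_info message (extract_query_info message)

-- ===== LEMMAS AND PROOFS =====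

lemma altStep_inv (l : List String) (p a m f : Bool) (s : Option String) :
    l.foldl altStep (p, a, m, f, s) =
      (p || l.any (fun t => (["friend", "friends", "his", "her", "their", "someone"] : List String).contains t),
       a || l.contains "attendance",
       m || (l.contains "marks" || l.contains "score"),
       f || (l.contains "faculty" || l.contains "teacher"),
       match s with | some x => some x | none => aSubjLoop l) := by
  induction l generalizing p a m f s with
  | nil => cases s <;> simp [aSubjLoop]
  | cons t ts ih =>
    simp only [List.foldl_cons]
    by_cases h1 : (["friend", "friends", "his", "her", "their", "someone"] : List String).contains t
    · have ht : t = "friend" ∨ t = "friends" ∨ t = "his" ∨ t = "her" ∨ t = "their" ∨ t = "someone" := by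
        simpa using h1
      rcases ht with h | h | h | h | h | h <;> subst h <;> cases s <;>
        simp [altStep, ih, aSubjLoop]
    · by_cases h2 : t = "attendance"
      · subst h2; cases s <;> simp [altStep, ih, aSubjLoop]
      · by_cases h3 : t = "marks" ∨ t = "score"
        · rcases h3 with h | h <;> subst h <;> cases s <;> simp [altStep, ih, aSubjLoop]
        · by_cases h4 : t = "faculty" ∨ t = "teacher"
          · rcases h4 with h | h <;> subst h <;> cases s <;> simp [altStep, ih, aSubjLoop]
          · by_cases h5 : (["dbms", "math", "os", "cse", "ds", "ai", "ml"] : List String).contains t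
            · have ht : t = "dbms" ∨ t = "math" ∨ t = "os" ∨ t = "cse" ∨ t = "ds" ∨ t = "ai" ∨ t = "ml" := by
                simpa using h5
              rcases ht with h | h | h | h | h | h | h <;> subst h <;> cases s <;>
                simp [altStep, ih, aSubjLoop]
            · push_neg at h3 h4
              obtain ⟨h3a, h3b⟩ := h3
              obtain ⟨h4a, h4b⟩ := h4
              have h1' := h1; have h5' := h5
              simp only [List.contains_eq_mem, List.mem_cons, List.not_mem_nil,
                or_false, decide_eq_true_eq, not_or] at h1' h5'
              obtain ⟨p1, p2, p3, p4, p5, p6⟩ := h1'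
              obtain ⟨q1, q2, q3, q4, q5, q6, q7⟩ := h5'
              have e : altStep (p, a, m, f, s) t = (p, a, m, f, s) := by
                cases s <;>
                  simp [altStep, p1, p2, p3, p4, p5, p6, q1, q2, q3, q4, q5, q6, q7,
                    h2, h3a, h3b, h4a, h4b]
              rw [e, ih]
              cases s <;>
                simp [aSubjLoop, p1, p2, p3, p4, p5, p6, q1, q2, q3, q4, q5, q6, q7,
                  Ne.symm h2, Ne.symm h3a, Ne.symm h3b, Ne.symm h4a, Ne.symm h4b,
                  List.any_cons]

lemma any_contains_swap (l1 l2 : List String) :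
    l1.any (fun w => l2.contains w) = l2.any (fun t => l1.contains t) := by
  apply Bool.eq_iff_iff.mpr
  simp only [List.any_eq_true, List.contains_eq_mem, decide_eq_true_eq]
  tauto

lemma core_eq (tokens : List String) :
    (if (["friend", "friends", "his", "her", "their", "someone"] : List String).any
        (fun w => tokens.contains w) then
      ((some "unsupported" : Option String), (none : Option String))
    else
      (if tokens.contains "attendance" then some "attendance"
       else if tokens.contains "marks" || tokens.contains "score" then some "marks"
       else if tokens.contains "faculty" || tokens.contains "teacher" then some "faculty"
       else none, aSubjLoop tokens)) =
    (let st := tokens.foldl altStep (false, false, false, false, none)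
     if st.1 then (some "unsupported", none)
     else
       (if st.2.1 then some "attendance"
        else if st.2.2.1 then some "marks"
        else if st.2.2.2.1 then some "faculty"
        else none, st.2.2.2.2)) := by
  rw [altStep_inv, any_contains_swap]
  simp

-- ===== VERDICT (by name: the statement is the Claim_ definition above) =====
set_option maxHeartbeats 1000000 in
theorem extract_query_info_spec : Claim_equal_extract_query_info := by
  intro message _
  simp only [Spec_extract_query_info, extract_query_info, extract_query_info_alt, pyTokenize]
  exact core_eq _
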